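-- pv_equiv track=rewrite | github.com/shanmukhgara48-source/Adaptive-Cyber-Defence | tests/test_adversarial.py | _pick_action
-- ===== SOURCE A (Python) =====
-- MITRE_ACTION = {
--     "phishing": "block_ip", "malware": "isolate_machine",
--     "ransomware": "isolate_machine", "ddos": "patch",
--     "lateral_movement": "block_ip",
-- }
--
-- def _pick_action(obs: dict, scanned: set, step_num: int) -> str:
--     threats = obs.get("visible_threats", [])
--     unscanned = [f"node_{i}" for i in range(1, 6) if f"node_{i}" not in scanned]
--     for t in threats:
--         if t.get("type") == "lateral_movement" or t.get("stage") == "lateral_movement":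
--             return "block_ip"
--     for t in threats:
--         a = MITRE_ACTION.get(t.get("type", ""))
--         if a:
--             return a
--     if not threats and unscanned:
--         return f"scan_node_{unscanned[0].split('_')[1]}"
--     if not threats:
--         return f"scan_node_{(step_num % 5) + 1}"
--     return "ignore"
-- ===== SOURCE B (Python) =====
-- MITRE_ACTION = {
--     "phishing": "block_ip", "malware": "isolate_machine",
--     "ransomware": "isolate_machine", "ddos": "patch",
--     "lateral_movement": "block_ip",
-- }
--
-- def _pick_action(obs: dict, scanned: set, step_num: int) -> str:
--     threats = obs.get("visible_threats", [])
--     # rank-and-select: materialize every possible response with a priority,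
--     # then take the action of the first minimum-priority candidate.
--     candidates = []
--     for t in threats:
--         if t.get("type") == "lateral_movement" or t.get("stage") == "lateral_movement":
--             candidates.append((0, "block_ip"))
--         a = MITRE_ACTION.get(t.get("type", ""))
--         if a:
--             candidates.append((1, a))
--     best = None
--     for c in candidates:
--         if best is None or c[0] < best[0]:
--             best = c
--     if best is not None:
--         return best[1]
--     if threats:
--         return "ignore"
--     for i in range(1, 6):
--         if f"node_{i}" not in scanned:
--             return f"scan_node_{i}"
--     return f"scan_node_{(step_num % 5) + 1}"
-- ===== Notes on version B (the rewrite author's own statement) =====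
-- stated objective: alternative
-- what changed: B replaces A's two sequential early-return scans over threats with a rank-and-select scheme: it materializes a list of (priority, action) candidates (0 for lateral-movement evidence, 1 for MITRE-mapped types) and an argmin loop picks the first minimum-priority candidate; the no-threat branch returns scan_node_i for the first unscanned index directly instead of building the 'unscanned' name list and re-extracting the index with split('_')[1].
import Mathlib
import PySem

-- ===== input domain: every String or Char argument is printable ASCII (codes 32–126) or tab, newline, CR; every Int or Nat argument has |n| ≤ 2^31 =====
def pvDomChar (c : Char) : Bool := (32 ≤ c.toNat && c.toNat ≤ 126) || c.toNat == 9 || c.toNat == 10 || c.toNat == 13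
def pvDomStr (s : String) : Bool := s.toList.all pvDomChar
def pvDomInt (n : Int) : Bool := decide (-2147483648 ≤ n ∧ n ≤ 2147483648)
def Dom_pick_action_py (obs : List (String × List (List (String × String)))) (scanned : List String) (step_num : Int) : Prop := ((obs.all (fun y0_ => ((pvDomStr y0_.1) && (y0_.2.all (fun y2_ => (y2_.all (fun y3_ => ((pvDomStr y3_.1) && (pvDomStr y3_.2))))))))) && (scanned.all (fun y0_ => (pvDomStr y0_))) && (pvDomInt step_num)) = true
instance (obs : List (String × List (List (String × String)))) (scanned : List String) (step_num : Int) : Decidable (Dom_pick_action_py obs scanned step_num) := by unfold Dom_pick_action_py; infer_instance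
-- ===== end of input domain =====

-- B replaces A's two early-return scans of `threats` with a rank-and-select scheme: it
-- materializes a list of (priority, action) candidates, then an argmin loop picks the
-- first minimum-priority one; the no-threat branch scans node indices directly. Objective: alternative.

-- ===== PORT A =====
-- module constant MITRE_ACTION (shared by both Pythons)
def MITRE_ACTION : PySem.Dict String String :=
  PySem.Dict.mk [("phishing", "block_ip"), ("malware", "isolate_machine"),
                 ("ransomware", "isolate_machine"), ("ddos", "patch"),
                 ("lateral_movement", "block_ip")]

-- t.get(k) on a threat dict (first-match association-list lookup)
def tget (t : List (String × String)) (k : String) : Option String :=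
  (PySem.Dict.mk t).get? k

-- the shared condition t.get("type") == "lateral_movement" or t.get("stage") == "lateral_movement"
def latP (t : List (String × String)) : Bool :=
  tget t "type" == some "lateral_movement" || tget t "stage" == some "lateral_movement"

-- A's first loop: for t in threats: if lateral: return "block_ip"
def aLoop1 : List (List (String × String)) → Bool
  | [] => false
  | t :: r => if latP t then true else aLoop1 r

-- A's second loop: a = MITRE_ACTION.get(t.get("type","")); if a: return a
-- (every value of MITRE_ACTION is a nonempty string, so `if a:` is exactly `a is not None`)
def aLoop2 : List (List (String × String)) → Option String
  | [] => none
  | t :: r =>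
      match MITRE_ACTION.get? (PySem.Dict.getD (PySem.Dict.mk t) "type" "") with
      | some a => some a
      | none => aLoop2 r

def pick_action_py (obs : List (String × List (List (String × String)))) (scanned : List String) (step_num : Int) : String :=
  let threats := PySem.Dict.getD (PySem.Dict.mk obs) "visible_threats" []
  let unscanned := ((PySem.List.pyRange 1 6 1).filter
      (fun i => !(scanned.contains ("node_" ++ PySem.Int.toStr i)))).map
      (fun i => "node_" ++ PySem.Int.toStr i)
  if aLoop1 threats then "block_ip"
  else match aLoop2 threats with
    | some a => a
    | none =>
      if threats.isEmpty && !unscanned.isEmpty then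
        -- unscanned[0].split('_')[1]: both indices are always in range here
        "scan_node_" ++ PySem.List.pyGetD ((PySem.Str.split? (PySem.List.pyGetD unscanned 0 "") "_").getD []) 1 ""
      else if threats.isEmpty then
        "scan_node_" ++ PySem.Int.toStr (PySem.Int.mod step_num 5 + 1)
      else "ignore"

-- ===== PORT B =====
-- B's candidate-building loop body: each threat contributes a priority-0 candidate if it
-- shows lateral movement, and a priority-1 candidate if its type is MITRE-mapped
def bCandStep (acc : List (Int × String)) (t : List (String × String)) : List (Int × String) :=
  let acc1 := if latP t then acc ++ [((0 : Int), "block_ip")] else acc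
  match MITRE_ACTION.get? (PySem.Dict.getD (PySem.Dict.mk t) "type" "") with
  | some a => acc1 ++ [((1 : Int), a)]
  | none => acc1

-- B's argmin loop: best = c on strict priority improvement (keeps the FIRST minimum)
def bBestStep (best : Option (Int × String)) (c : Int × String) : Option (Int × String) :=
  match best with
  | none => some c
  | some b => if c.1 < b.1 then some c else some b

-- B's scan loop: for i in range(1,6): if f"node_{i}" not in scanned: return f"scan_node_{i}"
def bScan : List Int → List String → Option Int
  | [], _ => none
  | i :: r, scanned =>
      if scanned.contains ("node_" ++ PySem.Int.toStr i) then bScan r scanned else some i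

def pick_action_py_alt (obs : List (String × List (List (String × String)))) (scanned : List String) (step_num : Int) : String :=
  let threats := PySem.Dict.getD (PySem.Dict.mk obs) "visible_threats" []
  let candidates := threats.foldl bCandStep []
  let best := candidates.foldl bBestStep none
  match best with
  | some b => b.2
  | none =>
    if !threats.isEmpty then "ignore"
    else match bScan (PySem.List.pyRange 1 6 1) scanned with
      | some i => "scan_node_" ++ PySem.Int.toStr i
      | none => "scan_node_" ++ PySem.Int.toStr (PySem.Int.mod step_num 5 + 1)

-- ===== PRECONDITION & SPEC =====
def Spec_pick_action_py (obs : List (String × List (List (String × String)))) (scanned : List String) (step_num : Int) (out : String) : Prop := out = pick_action_py_alt obs scanned step_num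
instance (obs : List (String × List (List (String × String)))) (scanned : List String) (step_num : Int) (out : String) : Decidable (Spec_pick_action_py obs scanned step_num out) := by unfold Spec_pick_action_py; infer_instance

-- ===== CLAIM =====
def Claim_equal_pick_action_py : Prop := ∀ (obs : List (String × List (List (String × String)))) (scanned : List String) (step_num : Int), Dom_pick_action_py obs scanned step_num → Spec_pick_action_py obs scanned step_num (pick_action_py obs scanned step_num)

-- ===== LEMMAS AND PROOFS =====

-- the per-threat contribution of B's candidate loop, as a plain list
def candsOf (t : List (String × String)) : List (Int × String) :=
  (if latP t then [((0 : Int), "block_ip")] else []) ++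
  (match MITRE_ACTION.get? (PySem.Dict.getD (PySem.Dict.mk t) "type" "") with
   | some a => [((1 : Int), a)]
   | none => [])

theorem bCand_eq_flatMap (ts : List (List (String × String))) (acc : List (Int × String)) :
    ts.foldl bCandStep acc = acc ++ ts.flatMap candsOf := by
  induction ts generalizing acc with
  | nil => simp
  | cons t r ih =>
    simp only [List.foldl, List.flatMap_cons, ih, bCandStep, candsOf]
    cases latP t <;>
      cases MITRE_ACTION.get? (PySem.Dict.getD (PySem.Dict.mk t) "type" "") <;> simp

-- every candidate is (0,"block_ip") or has priority 1
theorem cands_keys (ts : List (List (String × String))) :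
    ∀ c ∈ ts.flatMap candsOf, (c.1 = 0 ∧ c.2 = "block_ip") ∨ c.1 = 1 := by
  intro c hc
  rw [List.mem_flatMap] at hc
  obtain ⟨t, _, hc⟩ := hc
  unfold candsOf at hc
  cases hl : latP t with
  | false =>
    cases hm : MITRE_ACTION.get? (PySem.Dict.getD (PySem.Dict.mk t) "type" "") with
    | none => simp [hl, hm] at hc
    | some a => simp [hl, hm] at hc; subst hc; right; rfl
  | true =>
    cases hm : MITRE_ACTION.get? (PySem.Dict.getD (PySem.Dict.mk t) "type" "") with
    | none => simp [hl, hm] at hc; subst hc; left; exact ⟨rfl, rfl⟩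
    | some a =>
      simp [hl, hm] at hc
      rcases hc with hc | hc
      · subst hc; left; exact ⟨rfl, rfl⟩
      · subst hc; right; rfl

-- if A's first loop fires, a priority-0 candidate exists
theorem cands_zero_mem (ts : List (List (String × String))) (h : aLoop1 ts = true) :
    ∃ c ∈ ts.flatMap candsOf, c.1 = 0 := by
  induction ts with
  | nil => simp [aLoop1] at h
  | cons t r ih =>
    simp only [aLoop1] at h
    by_cases hl : latP t = true
    · exact ⟨(0, "block_ip"), by simp [candsOf, hl], rfl⟩
    · simp [hl] at h
      obtain ⟨c, hc, h0⟩ := ih h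
      exact ⟨c, by simp [List.mem_flatMap] at hc ⊢; tauto, h0⟩

-- if A's first loop does not fire, all candidates have priority 1
theorem cands_no_zero (ts : List (List (String × String))) (h : aLoop1 ts = false) :
    ∀ c ∈ ts.flatMap candsOf, c.1 = 1 := by
  induction ts with
  | nil => simp
  | cons t r ih =>
    simp only [aLoop1] at h
    by_cases hl : latP t = true
    · simp [hl] at h
    · simp only [Bool.not_eq_true] at hl
      simp [hl] at h
      intro c hc
      simp only [List.flatMap_cons, List.mem_append] at hc
      rcases hc with hc | hc
      · unfold candsOf at hc
        cases hm : MITRE_ACTION.get? (PySem.Dict.getD (PySem.Dict.mk t) "type" "") <;>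
          simp [hl, hm] at hc
        simp [hc]
      · exact ih h c hc
-- (cons case of hc first branch: candsOf with latP false is [] or [(1,a)])

-- if A's first loop does not fire, the candidate list starts with A's second-loop action
theorem cands_head (ts : List (List (String × String))) (h : aLoop1 ts = false) :
    (match aLoop2 ts with
     | some a => ∃ rest, ts.flatMap candsOf = ((1 : Int), a) :: rest
     | none => ts.flatMap candsOf = []) := by
  induction ts with
  | nil => simp [aLoop2]
  | cons t r ih =>
    simp only [aLoop1] at h
    by_cases hl : latP t = true
    · simp [hl] at h
    · simp only [Bool.not_eq_true] at hl
      simp [hl] at h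
      have ih' := ih h
      simp only [aLoop2, List.flatMap_cons]
      cases hm : MITRE_ACTION.get? (PySem.Dict.getD (PySem.Dict.mk t) "type" "") with
      | some a => exact ⟨r.flatMap candsOf, by simp [candsOf, hl, hm]⟩
      | none =>
        simp only [candsOf, hl, hm]
        simpa using ih'

-- argmin never abandons a priority no candidate beats
theorem argmin_keep (cs : List (Int × String)) (b : Int × String)
    (h : ∀ c ∈ cs, ¬ c.1 < b.1) :
    cs.foldl bBestStep (some b) = some b := by
  induction cs with
  | nil => rfl
  | cons c r ih =>
    simp only [List.foldl, bBestStep]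
    rw [if_neg (h c (by simp))]
    exact ih (fun c hc => h c (by simp [hc]))

-- with keys in {0,1} and a 0 present (or already held), argmin lands on (0,"block_ip")
theorem argmin_zero (cs : List (Int × String)) (acc : Option (Int × String))
    (hk : ∀ c ∈ cs, (c.1 = 0 ∧ c.2 = "block_ip") ∨ c.1 = 1)
    (ha : acc = none ∨ acc = some (0, "block_ip") ∨ ∃ x, acc = some (1, x))
    (h0 : (∃ c ∈ cs, c.1 = 0) ∨ acc = some (0, "block_ip")) :
    cs.foldl bBestStep acc = some (0, "block_ip") := by
  induction cs generalizing acc with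
  | nil =>
    rcases h0 with ⟨c, hc, _⟩ | h0
    · simp at hc
    · simpa using h0
  | cons c r ih =>
    have hc := hk c (by simp)
    simp only [List.foldl]
    rcases hc with ⟨h1, h2⟩ | h1
    · -- c = (0, "block_ip")
      have hceq : c = (0, "block_ip") := Prod.ext h1 h2
      have hacc' : r.foldl bBestStep (bBestStep acc c) = r.foldl bBestStep (some (0, "block_ip")) := by
        rcases ha with ha | ha | ⟨x, ha⟩ <;> subst ha <;> simp [bBestStep, hceq]
      rw [hacc']
      exact ih (some (0, "block_ip")) (fun c hc => hk c (by simp [hc]))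
        (Or.inr (Or.inl rfl)) (Or.inr rfl)
    · -- c has priority 1
      refine ih (bBestStep acc c) (fun c hc => hk c (by simp [hc])) ?_ ?_
      · rcases ha with ha | ha | ⟨x, ha⟩
        · subst ha
          right; right
          exact ⟨c.2, by simp [bBestStep, Prod.ext_iff, h1]⟩
        · subst ha
          right; left
          simp [bBestStep, h1]
        · subst ha
          right; right
          exact ⟨x, by simp [bBestStep, h1]⟩
      · rcases h0 with ⟨c', hc', h0'⟩ | h0
        · simp only [List.mem_cons] at hc'
          rcases hc' with hc' | hc'
          · rw [hc'] at h0'; rw [h0'] at h1; norm_num at h1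
          · exact Or.inl ⟨c', hc', h0'⟩
        · subst h0
          simp [bBestStep, h1]

-- the two "pick an unscanned node" computations agree (and agree on the fallback)
theorem scan_eq (scanned : List String) (step_num : Int) :
    (if !(((PySem.List.pyRange 1 6 1).filter
        (fun i => !(scanned.contains ("node_" ++ PySem.Int.toStr i)))).map
        (fun i => "node_" ++ PySem.Int.toStr i)).isEmpty then
      "scan_node_" ++ PySem.List.pyGetD ((PySem.Str.split?
        (PySem.List.pyGetD (((PySem.List.pyRange 1 6 1).filter
          (fun i => !(scanned.contains ("node_" ++ PySem.Int.toStr i)))).map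
          (fun i => "node_" ++ PySem.Int.toStr i)) 0 "") "_").getD []) 1 ""
     else "scan_node_" ++ PySem.Int.toStr (PySem.Int.mod step_num 5 + 1)) =
    (match bScan (PySem.List.pyRange 1 6 1) scanned with
      | some i => "scan_node_" ++ PySem.Int.toStr i
      | none => "scan_node_" ++ PySem.Int.toStr (PySem.Int.mod step_num 5 + 1)) := by
  have h : PySem.List.pyRange 1 6 1 = [1, 2, 3, 4, 5] := by decide
  rw [h]
  simp only [List.filter, bScan]
  cases h1 : scanned.contains ("node_" ++ PySem.Int.toStr 1) <;>
    cases h2 : scanned.contains ("node_" ++ PySem.Int.toStr 2) <;>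
    cases h3 : scanned.contains ("node_" ++ PySem.Int.toStr 3) <;>
    cases h4 : scanned.contains ("node_" ++ PySem.Int.toStr 4) <;>
    cases h5 : scanned.contains ("node_" ++ PySem.Int.toStr 5) <;>
    simp <;> decide

-- ===== VERDICT =====
theorem pick_action_py_spec : Claim_equal_pick_action_py := by
  intro obs scanned step_num _
  unfold Spec_pick_action_py pick_action_py pick_action_py_alt
  simp only [bCand_eq_flatMap, List.nil_append]
  set ts := PySem.Dict.getD (PySem.Dict.mk obs) "visible_threats" [] with hts
  cases h1 : aLoop1 ts with
  | true =>
    rw [argmin_zero (ts.flatMap candsOf) none (cands_keys ts) (Or.inl rfl)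
      (Or.inl (cands_zero_mem ts h1))]
    simp
  | false =>
    have hh := cands_head ts h1
    cases h2 : aLoop2 ts with
    | some a =>
      rw [h2] at hh
      obtain ⟨rest, hr⟩ := hh
      rw [hr]
      simp only [List.foldl, bBestStep]
      rw [argmin_keep rest (1, a) (fun c hc => by
        have := cands_no_zero ts h1 c (by rw [hr]; simp [hc])
        simp [this])]
      simp
    | none =>
      rw [h2] at hh
      rw [hh]
      simp only [List.foldl_nil]
      cases he : ts.isEmpty with
      | false => simp
      | true => simpa [he] using scan_eq scanned step_num
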